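-- pv_equiv track=rewrite | github.com/Srikant-03/prism | backend/profiling/target_detector.py | _token_match
-- ===== SOURCE A (Python) =====
-- def _token_match(col_name: str, hints: list) -> bool:
--     """Check if any hint appears as a full token in the column name.
--     Splits on underscores/hyphens and checks for exact token equality."""
--     tokens = col_name.lower().replace('-', '_').split('_')
--     for hint in hints:
--         hint_tokens = hint.lower().replace('-', '_').rstrip('_').split('_')
--         for i in range(len(tokens) - len(hint_tokens) + 1):
--             if tokens[i:i+len(hint_tokens)] == hint_tokens:
--                 return True
--     return False
-- ===== SOURCE B (Python) =====
-- def _token_match(col_name: str, hints: list) -> bool: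
--     """Check if any hint appears as a full token run in the column name,
--     via an underscore-padded substring test (no tokenization)."""
--     col = '_' + col_name.lower().replace('-', '_') + '_'
--     return any(
--         '_' + hint.lower().replace('-', '_').rstrip('_') + '_' in col
--         for hint in hints
--     )
-- ===== Notes on version B (the rewrite author's own statement) =====
-- stated objective: simpler
-- what changed: B never tokenizes: it pads the normalized column and hint with underscores and uses one substring test per hint, instead of splitting both into token lists and scanning every window of the token list for a sublist match.
import Mathlib
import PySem

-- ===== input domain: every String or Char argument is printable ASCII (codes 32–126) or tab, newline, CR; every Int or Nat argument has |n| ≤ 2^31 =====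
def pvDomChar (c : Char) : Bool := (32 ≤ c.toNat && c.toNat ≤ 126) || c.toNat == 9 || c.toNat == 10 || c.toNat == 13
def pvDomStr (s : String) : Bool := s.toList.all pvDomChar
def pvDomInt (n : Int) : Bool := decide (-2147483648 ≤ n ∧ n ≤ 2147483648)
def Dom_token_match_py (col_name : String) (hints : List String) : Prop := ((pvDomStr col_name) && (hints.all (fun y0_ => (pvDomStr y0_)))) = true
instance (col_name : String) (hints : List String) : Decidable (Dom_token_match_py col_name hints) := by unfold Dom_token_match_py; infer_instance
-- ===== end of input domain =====

-- B replaces A's tokenize-and-scan-every-window search by one underscore-padded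
-- substring test per hint (objective: simpler).

-- hand port of Python's s.rstrip('_') (PySem has no rstrip-with-chars): exact —
-- removes exactly the maximal run of trailing '_' characters, used by both ports
-- because both Pythons normalize hints with .rstrip('_')
def pyRstripUnderscore (s : List Char) : List Char :=
  (s.reverse.dropWhile (fun c => c == '_')).reverse

-- ===== PORT A =====
def token_match_py (col_name : String) (hints : List String) : Bool :=
  let tokens := PySem.Chars.splitOn (PySem.Chars.replace (PySem.Chars.lower col_name.toList) ['-'] ['_']) ['_']
  hints.any (fun hint =>
    let hintTokens := PySem.Chars.splitOn (pyRstripUnderscore (PySem.Chars.replace (PySem.Chars.lower hint.toList) ['-'] ['_'])) ['_']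
    (PySem.List.pyRange 0 ((tokens.length : Int) - (hintTokens.length : Int) + 1) 1).any (fun i =>
      PySem.List.slice tokens (some i) (some (i + (hintTokens.length : Int))) == hintTokens))

-- ===== PORT B =====
def token_match_py_alt (col_name : String) (hints : List String) : Bool :=
  let col := '_' :: PySem.Chars.replace (PySem.Chars.lower col_name.toList) ['-'] ['_'] ++ ['_']
  hints.any (fun hint =>
    PySem.Chars.isIn ('_' :: pyRstripUnderscore (PySem.Chars.replace (PySem.Chars.lower hint.toList) ['-'] ['_']) ++ ['_']) col)

-- ===== PRECONDITION & SPEC =====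
def Spec_token_match_py (col_name : String) (hints : List String) (out : Bool) : Prop := out = token_match_py_alt col_name hints
instance (col_name : String) (hints : List String) (out : Bool) : Decidable (Spec_token_match_py col_name hints out) := by unfold Spec_token_match_py; infer_instance

-- ===== CLAIM (what is proved, stated in full; the proofs are below) =====
def Claim_equal_token_match_py : Prop := ∀ (col_name : String) (hints : List String), Dom_token_match_py col_name hints → Spec_token_match_py col_name hints (token_match_py col_name hints)

-- ===== LEMMAS AND PROOFS =====

-- proof-side model of Python's s.split('_') (accumulator form mirroring splitOn.go)
def pvSplitU : List Char → List Char → List (List Char)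
  | cur, [] => [cur.reverse]
  | cur, c :: rest => if c = '_' then cur.reverse :: pvSplitU [] rest else pvSplitU (c :: cur) rest

-- encode a token list back into a string: each token followed by one '_'
def pvE (l : List (List Char)) : List Char := l.flatMap (fun t => t ++ ['_'])

theorem pvSplitU_go (l : List Char) : ∀ (fuel : Nat) (cur : List Char) (acc : List (List Char)),
    l.length < fuel →
    PySem.Chars.splitOn.go ['_'] fuel l cur acc = acc.reverse ++ pvSplitU cur l := by
  induction l with
  | nil =>
    intro fuel cur acc h
    match fuel with
    | fuel + 1 => rw [PySem.Chars.splitOn.go.eq_def]; simp [pvSplitU]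
  | cons c rest ih =>
    intro fuel cur acc h
    match fuel with
    | fuel + 1 =>
      rw [PySem.Chars.splitOn.go.eq_def]
      simp only [List.isPrefixOf, Bool.and_true]
      by_cases hc : c = '_'
      · subst hc
        simp only [beq_self_eq_true, if_pos, List.length_cons, List.length_nil,
          List.drop_succ_cons, List.drop_zero]
        rw [ih fuel [] (cur.reverse :: acc) (by simpa using h)]
        simp [pvSplitU]
      · have hb : ('_' == c) = false := beq_eq_false_iff_ne.mpr (Ne.symm hc)
        simp only [hb, Bool.false_eq_true, if_false]
        rw [ih fuel (c :: cur) acc (by simpa using h)]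
        simp [pvSplitU, hc]

theorem splitOn_eq_pvSplitU (s : List Char) :
    PySem.Chars.splitOn s ['_'] = pvSplitU [] s := by
  unfold PySem.Chars.splitOn
  rw [pvSplitU_go s (s.length + 1) [] [] (by omega)]
  simp

theorem pvE_pvSplitU (s : List Char) : ∀ cur, pvE (pvSplitU cur s) = cur.reverse ++ s ++ ['_'] := by
  induction s with
  | nil => intro cur; simp [pvSplitU, pvE]
  | cons c rest ih =>
    intro cur
    by_cases hc : c = '_'
    · subst hc
      simp only [pvSplitU]
      simp only [pvE]
      have h := ih []
      simp only [pvE, List.reverse_nil, List.nil_append] at h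
      simp [h]
    · simp [pvSplitU, hc, ih (c :: cur)]

theorem pvSplitU_free (s : List Char) : ∀ cur, '_' ∉ cur → ∀ t ∈ pvSplitU cur s, '_' ∉ t := by
  induction s with
  | nil => intro cur hcur t ht; simp [pvSplitU] at ht; subst ht; simpa using hcur
  | cons c rest ih =>
    intro cur hcur t ht
    by_cases hc : c = '_'
    · subst hc
      simp [pvSplitU] at ht
      rcases ht with h | h
      · subst h; simpa using hcur
      · exact ih [] (by simp) t h
    · simp [pvSplitU, hc] at ht
      exact ih (c :: cur) (by simp [hcur, Ne.symm hc]) t ht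

theorem pvE_eq_nil {ys : List (List Char)} (h : pvE ys = []) : ys = [] := by
  cases ys with
  | nil => rfl
  | cons t ys => simp [pvE] at h

-- a ++ '_' :: p is a prefix of b ++ '_' :: q, with a b underscore-free, forces a = b
theorem pvSegPrefix (a : List Char) : ∀ (b p q : List Char), '_' ∉ a → '_' ∉ b →
    ((a ++ '_' :: p) <+: (b ++ '_' :: q) ↔ a = b ∧ p <+: q) := by
  induction a with
  | nil =>
    intro b p q _ hb
    cases b with
    | nil => simp
    | cons x b' =>
      simp only [List.nil_append, List.cons_append, List.cons_prefix_cons]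
      have hx : ¬ ('_' = x) := by simp at hb; exact hb.1
      constructor
      · rintro ⟨h, -⟩; exact absurd h hx
      · rintro ⟨h, -⟩; exact absurd h (by simp)
  | cons y a' ih =>
    intro b p q ha hb
    cases b with
    | nil =>
      simp only [List.nil_append, List.cons_append, List.cons_prefix_cons]
      have hy : ¬ ('_' = y) := by simp at ha; exact ha.1
      constructor
      · rintro ⟨h, -⟩; exact absurd h.symm hy
      · rintro ⟨h, -⟩; exact absurd h (by simp)
    | cons x b' =>
      simp only [List.cons_append, List.cons_prefix_cons]
      rw [ih b' p q (by simp at ha; exact ha.2) (by simp at hb; exact hb.2)]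
      constructor
      · rintro ⟨h1, h2, h3⟩; exact ⟨by rw [h1, h2], h3⟩
      · rintro ⟨h, h3⟩; simp at h; exact ⟨h.1, h.2, h3⟩

theorem pvPrefixE (ys : List (List Char)) : ∀ (xs : List (List Char)),
    (∀ t ∈ ys, '_' ∉ t) → (∀ t ∈ xs, '_' ∉ t) →
    (pvE ys <+: pvE xs ↔ ys <+: xs) := by
  induction ys with
  | nil => intro xs _ _; simp [pvE]
  | cons u ys' ih =>
    intro xs hy hx
    cases xs with
    | nil =>
      simp only [pvE, List.flatMap_nil, List.prefix_nil, List.flatMap_cons]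
      constructor
      · intro h; exact absurd h (by simp)
      · intro h; exact absurd h (by simp)
    | cons t xs' =>
      have e1 : pvE (u :: ys') = u ++ '_' :: pvE ys' := by simp [pvE]
      have e2 : pvE (t :: xs') = t ++ '_' :: pvE xs' := by simp [pvE]
      rw [e1, e2, pvSegPrefix u t (pvE ys') (pvE xs') (hy u (by simp)) (hx t (by simp)),
        ih xs' (fun s hs => hy s (by simp [hs])) (fun s hs => hx s (by simp [hs])),
        List.cons_prefix_cons]

-- a substring starting with '_' cannot start inside an underscore-free token
theorem pvSkipTok (t : List Char) : ∀ (r zs : List Char), '_' ∉ t →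
    (('_' :: zs) <:+: (t ++ r) ↔ ('_' :: zs) <:+: r) := by
  induction t with
  | nil => intro r zs _; simp
  | cons x t' ih =>
    intro r zs ht
    have hx : ¬ ('_' = x) := by simp at ht; exact ht.1
    rw [List.cons_append, List.infix_cons_iff]
    constructor
    · rintro (h | h)
      · rw [List.cons_prefix_cons] at h
        exact absurd h.1 hx
      · exact (ih r zs (by simp at ht; exact ht.2)).mp h
    · intro h
      exact Or.inr ((ih r zs (by simp at ht; exact ht.2)).mpr h)

theorem pvPadInfix (xs : List (List Char)) : ∀ (ys : List (List Char)),
    (∀ t ∈ ys, '_' ∉ t) → (∀ t ∈ xs, '_' ∉ t) →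
    (('_' :: pvE ys) <:+: ('_' :: pvE xs) ↔ ys <:+: xs) := by
  induction xs with
  | nil =>
    intro ys _ _
    constructor
    · intro h
      have hlen := h.length_le
      rw [show pvE ([] : List (List Char)) = [] from rfl] at hlen
      simp only [List.length_cons, List.length_nil] at hlen
      have hnil : (pvE ys).length = 0 := by omega
      rw [pvE_eq_nil (List.length_eq_zero_iff.mp hnil)]
    · intro h
      rw [List.infix_nil] at h
      subst h
      exact List.infix_refl _
  | cons t xs' ih =>
    intro ys hy hx
    have e2 : pvE (t :: xs') = t ++ '_' :: pvE xs' := by simp [pvE]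
    rw [e2, List.infix_cons_iff, List.cons_prefix_cons,
      pvSkipTok t ('_' :: pvE xs') (pvE ys) (hx t (by simp))]
    have hxs' : ∀ s ∈ xs', '_' ∉ s := fun s hs => hx s (by simp [hs])
    rw [ih ys hy hxs']
    have : pvE ys <+: t ++ '_' :: pvE xs' ↔ ys <+: t :: xs' := by
      rw [← e2, pvPrefixE ys (t :: xs') hy hx]
    rw [List.infix_cons_iff]
    constructor
    · rintro (⟨-, h⟩ | h)
      · exact Or.inl (this.mp h)
      · exact Or.inr h
    · rintro (h | h)
      · exact Or.inl ⟨rfl, this.mpr h⟩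
      · exact Or.inr h

-- A's index loop over windows decides exactly token-level infixhood
theorem pvLoopIffInfix (tokens ht : List (List Char)) :
    ((PySem.List.pyRange 0 ((tokens.length : Int) - (ht.length : Int) + 1) 1).any (fun i =>
      PySem.List.slice tokens (some i) (some (i + (ht.length : Int))) == ht)) = true ↔ ht <:+: tokens := by
  rw [List.any_eq_true]
  constructor
  · rintro ⟨i, hi, hslice⟩
    rw [PySem.List.mem_pyRange_one] at hi
    obtain ⟨m, rfl⟩ : ∃ m : Nat, (m : Int) = i := ⟨i.toNat, Int.toNat_of_nonneg hi.1⟩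
    rw [show ((m : Int) + (ht.length : Int)) = ((m + ht.length : Nat) : Int) by push_cast; ring,
      PySem.List.slice_natCast, beq_iff_eq,
      show m + ht.length - m = ht.length from by omega] at hslice
    have hpre : ht <+: tokens.drop m := by
      rw [List.prefix_iff_eq_take]
      exact hslice.symm
    exact hpre.isInfix.trans (List.drop_suffix m tokens).isInfix
  · rintro ⟨a, b, rfl⟩
    refine ⟨(a.length : Int), ?_, ?_⟩
    · rw [PySem.List.mem_pyRange_one]
      refine ⟨Int.natCast_nonneg _, ?_⟩
      simp only [List.length_append]
      push_cast
      omega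
    · rw [show ((a.length : Int) + (ht.length : Int)) = ((a.length + ht.length : Nat) : Int) by push_cast; ring,
        PySem.List.slice_natCast, beq_iff_eq,
        show a.length + ht.length - a.length = ht.length from by omega,
        List.append_assoc, List.drop_left, List.take_left]

-- the per-hint bodies of the two ports agree
theorem pvPerHint (c h : List Char) :
    ((PySem.List.pyRange 0 (((PySem.Chars.splitOn c ['_']).length : Int) - ((PySem.Chars.splitOn h ['_']).length : Int) + 1) 1).any (fun i =>
        PySem.List.slice (PySem.Chars.splitOn c ['_']) (some i) (some (i + ((PySem.Chars.splitOn h ['_']).length : Int))) == PySem.Chars.splitOn h ['_']))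
      = PySem.Chars.isIn ('_' :: h ++ ['_']) ('_' :: c ++ ['_']) := by
  rw [Bool.eq_iff_iff, pvLoopIffInfix, PySem.Chars.isIn_iff_infix]
  have hc : '_' :: c ++ ['_'] = '_' :: pvE (PySem.Chars.splitOn c ['_']) := by
    rw [splitOn_eq_pvSplitU, pvE_pvSplitU c []]; simp
  have hh : '_' :: h ++ ['_'] = '_' :: pvE (PySem.Chars.splitOn h ['_']) := by
    rw [splitOn_eq_pvSplitU, pvE_pvSplitU h []]; simp
  rw [hc, hh, pvPadInfix (PySem.Chars.splitOn c ['_']) (PySem.Chars.splitOn h ['_'])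
    (by rw [splitOn_eq_pvSplitU]; exact pvSplitU_free h [] (by simp))
    (by rw [splitOn_eq_pvSplitU]; exact pvSplitU_free c [] (by simp))]

-- ===== VERDICT (by name: the statement is the Claim_ definition above) =====
theorem token_match_py_spec : Claim_equal_token_match_py := by
  intro col_name hints _
  unfold Spec_token_match_py
  simp only [token_match_py, token_match_py_alt]
  exact PySem.List.any_congr_mem (fun hint _ =>
    pvPerHint (PySem.Chars.replace (PySem.Chars.lower col_name.toList) ['-'] ['_'])
      (pyRstripUnderscore (PySem.Chars.replace (PySem.Chars.lower hint.toList) ['-'] ['_'])))
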